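-- pv_equiv track=rewrite | github.com/novac42/chrome-update-digest | src/processors/split_and_process_release_notes.py | _extract_webgpu_features
-- ===== SOURCE A (Python) =====
-- def _extract_webgpu_features(webgpu_content: str) -> str:
--     """
--     Extract only actual WebGPU feature sections from WebGPU release notes.
--     Excludes Origin trials, Deprecations, and other non-WebGPU sections.
--
--     Args:
--         webgpu_content: Full WebGPU release notes
--
--     Returns:
--         Only WebGPU-specific features
--     """
--     lines = webgpu_content.split('\n')
--     feature_lines = []
--     in_feature = False
--     skip_section = False
--
--     for line in lines:
--         # Skip main title
--         if line.startswith('# What\'s New in WebGPU') or line.startswith('# WebGPU'):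
--             continue
--
--         # Check for sections to skip
--         if line.startswith('## '):
--             section_name = line[3:].strip().lower()
--             # Skip these sections as they're not WebGPU-specific
--             skip_patterns = [
--                 'origin trial', 'deprecation', 'removal',
--                 'what\'s new in webgpu',  # Version history
--                 'chrome 1'  # Version references
--             ]
--             skip_section = any(pattern in section_name for pattern in skip_patterns)
--
--             # Dawn updates are WebGPU-specific
--             if 'dawn' in section_name:
--                 skip_section = False
--                 in_feature = True
--             elif not skip_section:
--                 in_feature = True
--             else:
--                 in_feature = False
--
--         # Add line if we're in a valid feature section
--         if in_feature and not skip_section: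
--             # Demote heading levels for merging
--             if line.startswith('## '):
--                 feature_lines.append('### ' + line[3:])
--             elif line.startswith('### '):
--                 feature_lines.append('#### ' + line[4:])
--             elif line.startswith('#### '):
--                 feature_lines.append('##### ' + line[5:])
--             else:
--                 feature_lines.append(line)
--
--     # Remove trailing empty lines
--     while feature_lines and not feature_lines[-1].strip():
--         feature_lines.pop()
--
--     return '\n'.join(feature_lines)
-- ===== SOURCE B (Python) =====
-- SKIP_PATTERNS = ('origin trial', 'deprecation', 'removal', "what's new in webgpu", 'chrome 1')
--
--
-- def _keep(header):
--     name = header[3:].strip().lower()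
--     return 'dawn' in name or not any(p in name for p in SKIP_PATTERNS)
--
--
-- def _emit(line):
--     if line.startswith("# What's New in WebGPU") or line.startswith('# WebGPU'):
--         return None
--     if line.startswith('## '):
--         return '### ' + line[3:]
--     if line.startswith('### '):
--         return '#### ' + line[4:]
--     if line.startswith('#### '):
--         return '##### ' + line[5:]
--     return line
--
--
-- def _extract_webgpu_features(webgpu_content: str) -> str:
--     # Partition into sections: each '## ' header starts one; the preamble is dropped.
--     sections = []
--     cur = None
--     for line in webgpu_content.split('\n'):
--         if line.startswith('## '):
--             cur = [line]
--             sections.append(cur)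
--         elif cur is not None:
--             cur.append(line)
--     out = []
--     for sec in sections:
--         if _keep(sec[0]):
--             out.extend(e for e in map(_emit, sec) if e is not None)
--     # Drop trailing blank lines.
--     keep = len(out)
--     while keep and not out[keep - 1].strip():
--         keep -= 1
--     return '\n'.join(out[:keep])
-- ===== Notes on version B (the rewrite author's own statement) =====
-- stated objective: simpler
-- what changed: Replaces A's line-by-line state machine (in_feature/skip_section flags threaded through one loop) with a section-based decomposition: group lines into markdown-header-delimited sections, decide keep/skip once per section from its header, emit kept sections through a single per-line transformer, then trim trailing blanks.
import Mathlib
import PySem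

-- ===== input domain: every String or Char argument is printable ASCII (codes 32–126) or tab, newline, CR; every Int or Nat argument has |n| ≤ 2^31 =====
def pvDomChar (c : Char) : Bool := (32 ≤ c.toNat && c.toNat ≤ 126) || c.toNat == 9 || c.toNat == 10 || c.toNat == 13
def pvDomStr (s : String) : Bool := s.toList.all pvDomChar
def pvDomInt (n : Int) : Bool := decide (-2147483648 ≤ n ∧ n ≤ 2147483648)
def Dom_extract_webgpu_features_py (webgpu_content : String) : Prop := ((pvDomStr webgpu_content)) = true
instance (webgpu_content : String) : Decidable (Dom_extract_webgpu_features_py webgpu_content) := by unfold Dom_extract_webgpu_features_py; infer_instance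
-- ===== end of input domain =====

-- B replaces A's flag-threading line loop by a section decomposition (group by '## ' headers,
-- one keep decision per section); same values, objective: simpler.

-- ===== PORT A =====
-- A's for-loop over the lines, carrying (feature_lines, in_feature, skip_section).
def pvA_loop : List String → List String → Bool → Bool → List String
  | [], acc, _, _ => acc
  | line :: rest, acc, inF, skip =>
    if PySem.Str.startswith line "# What's New in WebGPU" || PySem.Str.startswith line "# WebGPU" then
      pvA_loop rest acc inF skip
    else
      let st :=
        if PySem.Str.startswith line "## " then
          let name := PySem.Str.lower (PySem.Str.strip (PySem.Str.slice line (some 3) none))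
          let skip2 := ["origin trial", "deprecation", "removal", "what's new in webgpu",
            "chrome 1"].any (fun p => PySem.Str.isIn p name)
          if PySem.Str.isIn "dawn" name then (true, false)
          else if !skip2 then (true, skip2)
          else (false, skip2)
        else (inF, skip)
      if st.1 && !st.2 then
        if PySem.Str.startswith line "## " then
          pvA_loop rest (acc ++ ["### " ++ PySem.Str.slice line (some 3) none]) st.1 st.2
        else if PySem.Str.startswith line "### " then
          pvA_loop rest (acc ++ ["#### " ++ PySem.Str.slice line (some 4) none]) st.1 st.2
        else if PySem.Str.startswith line "#### " then
          pvA_loop rest (acc ++ ["##### " ++ PySem.Str.slice line (some 5) none]) st.1 st.2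
        else pvA_loop rest (acc ++ [line]) st.1 st.2
      else pvA_loop rest acc st.1 st.2

-- A's trailing while-pop loop.
def pvA_trim (xs : List String) : List String :=
  if xs = [] then xs
  else if PySem.Str.strip (xs.getLastD "") == "" then pvA_trim xs.dropLast else xs
termination_by xs.length
decreasing_by
  have hl : 0 < xs.length := List.length_pos_iff.mpr (by assumption)
  simp [List.length_dropLast]; omega

def extract_webgpu_features_py (webgpu_content : String) : String :=
  let lines := (PySem.Str.split? webgpu_content "\n").getD []
  PySem.Str.join "\n" (pvA_trim (pvA_loop lines [] false false))

-- ===== PORT B =====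
def pvB_keep (header : String) : Bool :=
  let name := PySem.Str.lower (PySem.Str.strip (PySem.Str.slice header (some 3) none))
  PySem.Str.isIn "dawn" name ||
    !(["origin trial", "deprecation", "removal", "what's new in webgpu",
       "chrome 1"].any (fun p => PySem.Str.isIn p name))

def pvB_emit (line : String) : Option String :=
  if PySem.Str.startswith line "# What's New in WebGPU" || PySem.Str.startswith line "# WebGPU" then
    none
  else if PySem.Str.startswith line "## " then some ("### " ++ PySem.Str.slice line (some 3) none)
  else if PySem.Str.startswith line "### " then some ("#### " ++ PySem.Str.slice line (some 4) none)
  else if PySem.Str.startswith line "#### " then some ("##### " ++ PySem.Str.slice line (some 5) none)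
  else some line

-- body of the current section: lines up to (excluding) the next '## ' header
def pvB_takeBody : List String → List String × List String
  | [] => ([], [])
  | l :: rest =>
    if PySem.Str.startswith l "## " then ([], l :: rest)
    else
      let p := pvB_takeBody rest
      (l :: p.1, p.2)

theorem pvB_takeBody_len : ∀ ls : List String, (pvB_takeBody ls).2.length ≤ ls.length := by
  intro ls
  induction ls with
  | nil => simp [pvB_takeBody]
  | cons l rest ih =>
    simp only [pvB_takeBody]
    split
    · simp
    · simpa using Nat.le_succ_of_le ih

def pvB_sections : List String → List (String × List String)
  | [] => []
  | l :: rest =>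
    if PySem.Str.startswith l "## " then
      let p := pvB_takeBody rest
      (l, p.1) :: pvB_sections p.2
    else pvB_sections rest
termination_by ls => ls.length
decreasing_by
  · have := pvB_takeBody_len rest
    simp; omega
  · simp

def pvB_flat (secs : List (String × List String)) : List String :=
  secs.flatMap (fun sec => if pvB_keep sec.1 then (sec.1 :: sec.2).filterMap pvB_emit else [])

def pvB_trim (xs : List String) : List String :=
  ((xs.reverse).dropWhile (fun l => PySem.Str.strip l == "")).reverse

def extract_webgpu_features_py_alt (webgpu_content : String) : String :=
  let lines := (PySem.Str.split? webgpu_content "\n").getD []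
  PySem.Str.join "\n" (pvB_trim (pvB_flat (pvB_sections lines)))

-- ===== PRECONDITION & SPEC =====
def Spec_extract_webgpu_features_py (webgpu_content : String) (out : String) : Prop := out = extract_webgpu_features_py_alt webgpu_content
instance (webgpu_content : String) (out : String) : Decidable (Spec_extract_webgpu_features_py webgpu_content out) := by unfold Spec_extract_webgpu_features_py; infer_instance

-- ===== CLAIM (what is proved, stated in full; the proofs are below) =====
def Claim_equal_extract_webgpu_features_py : Prop := ∀ (webgpu_content : String), Dom_extract_webgpu_features_py webgpu_content → Spec_extract_webgpu_features_py webgpu_content (extract_webgpu_features_py webgpu_content)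

-- ===== LEMMAS AND PROOFS =====

-- disjoint prefixes: a line cannot start with both '# ' and '## '
theorem pv_prefix_clash {s t u : List Char} {p q : List Char}
    (h1 : ('#' :: '#' :: p) ++ t = s) (h2 : ('#' :: ' ' :: q) ++ u = s) : False := by
  rw [← h1] at h2
  simp only [List.cons_append, List.cons.injEq] at h2
  exact absurd h2.2.1 (by decide)

-- a line starting with '## ' never matches the title-skip test
theorem pv_header_not_title (l : String)
    (h : PySem.Str.startswith l "## " = true) :
    (PySem.Str.startswith l "# What's New in WebGPU" || PySem.Str.startswith l "# WebGPU") = false := by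
  simp only [PySem.Str.startswith_eq] at h ⊢
  rw [Bool.or_eq_false_iff]
  obtain ⟨t, ht⟩ := (PySem.Chars.startswith_iff _ _).mp h
  rw [show ("## ".toList) = '#' :: '#' :: [' '] from rfl] at ht
  constructor <;>
  · rw [← Bool.not_eq_true, PySem.Chars.startswith_iff]
    rintro ⟨u, hu⟩
    first
      | exact pv_prefix_clash ht
          (by rw [show ("# What's New in WebGPU".toList) = '#' :: ' ' :: "What's New in WebGPU".toList from rfl] at hu; exact hu)
      | exact pv_prefix_clash ht
          (by rw [show ("# WebGPU".toList) = '#' :: ' ' :: "WebGPU".toList from rfl] at hu; exact hu)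

-- a title line never starts with '## '
theorem pv_title_not_header (l : String)
    (h : (PySem.Str.startswith l "# What's New in WebGPU" || PySem.Str.startswith l "# WebGPU") = true) :
    PySem.Str.startswith l "## " = false := by
  rw [← Bool.not_eq_true]
  intro hh
  exact absurd h (by rw [pv_header_not_title l hh]; decide)

-- pvB_sections ignores the non-header prefix that pvB_takeBody strips
theorem pv_sections_takeBody (ls : List String) :
    pvB_sections (pvB_takeBody ls).2 = pvB_sections ls := by
  induction ls with
  | nil => simp [pvB_takeBody]
  | cons l rest ih =>
    by_cases hH : PySem.Str.startswith l "## " = true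
    · rw [pvB_takeBody]
      simp only [if_pos hH]
    · rw [pvB_takeBody]
      simp only [if_neg hH]
      conv_rhs => rw [pvB_sections]
      simp only [if_neg hH]
      exact ih

-- The heart of the equivalence: A's flag-threaded loop, started in the three
-- reachable states, produces exactly B's per-section output.
theorem pv_main (lines : List String) :
    (∀ acc b, pvA_loop lines acc false b = acc ++ pvB_flat (pvB_sections lines)) ∧
    (∀ acc, pvA_loop lines acc true false =
      acc ++ (pvB_takeBody lines).1.filterMap pvB_emit ++ pvB_flat (pvB_sections (pvB_takeBody lines).2)) := by
  induction lines with
  | nil =>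
    constructor
    · intro acc b; simp [pvA_loop, pvB_sections, pvB_flat]
    · intro acc; simp [pvA_loop, pvB_takeBody, pvB_sections, pvB_flat]
  | cons line rest ih =>
    obtain ⟨ih1, ih2⟩ := ih
    by_cases hT : (PySem.Str.startswith line "# What's New in WebGPU" || PySem.Str.startswith line "# WebGPU") = true
    · -- title line: A skips it; B's sections/emit drop it too
      have hH : ¬ (PySem.Str.startswith line "## " = true) :=
        ne_true_of_eq_false (pv_title_not_header line hT)
      have hE : pvB_emit line = none := by rw [pvB_emit]; simp only [if_pos hT]
      constructor
      · intro acc b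
        rw [pvA_loop]
        simp only [if_pos hT]
        rw [pvB_sections]
        simp only [if_neg hH]
        exact ih1 acc b
      · intro acc
        rw [pvA_loop]
        simp only [if_pos hT]
        rw [pvB_takeBody]
        simp only [if_neg hH, List.filterMap_cons, hE]
        exact ih2 acc
    · by_cases hH : PySem.Str.startswith line "## " = true
      · -- header line: one keep decision, then (ii) or (i)+section-skip
        have hstep : ∀ (acc : List String) (i s : Bool),
            pvA_loop (line :: rest) acc i s = acc ++ pvB_flat (pvB_sections (line :: rest)) := by
          intro acc i s
          rw [pvA_loop]
          simp only [if_neg hT, if_pos hH]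
          rw [pvB_sections]
          simp only [if_pos hH, pvB_flat, List.flatMap_cons]
          have hEmit : pvB_emit line = some ("### " ++ PySem.Str.slice line (some 3) none) := by
            rw [pvB_emit]; simp only [if_neg hT, if_pos hH]
          cases hD : PySem.Str.isIn "dawn"
              (PySem.Str.lower (PySem.Str.strip (PySem.Str.slice line (some 3) none))) with
          | true =>
            -- dawn section: kept
            have hK : pvB_keep line = true := by
              show (PySem.Str.isIn "dawn"
                  (PySem.Str.lower (PySem.Str.strip (PySem.Str.slice line (some 3) none))) ||
                !(["origin trial", "deprecation", "removal", "what's new in webgpu",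
                   "chrome 1"].any (fun p => PySem.Str.isIn p
                     (PySem.Str.lower (PySem.Str.strip (PySem.Str.slice line (some 3) none)))))) = true
              rw [hD]; rfl
            simp [ih2, hK, hEmit, pvB_flat, List.append_assoc]
          | false =>
            cases hA : (["origin trial", "deprecation", "removal", "what's new in webgpu",
                "chrome 1"].any (fun p => PySem.Str.isIn p
                  (PySem.Str.lower (PySem.Str.strip (PySem.Str.slice line (some 3) none))))) with
            | true =>
              -- matched a skip pattern: dropped
              have hK : pvB_keep line = false := by
                show (PySem.Str.isIn "dawn"
                    (PySem.Str.lower (PySem.Str.strip (PySem.Str.slice line (some 3) none))) ||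
                  !(["origin trial", "deprecation", "removal", "what's new in webgpu",
                     "chrome 1"].any (fun p => PySem.Str.isIn p
                       (PySem.Str.lower (PySem.Str.strip (PySem.Str.slice line (some 3) none)))))) = false
                rw [hD, hA]; rfl
              simp [ih1, hK, pv_sections_takeBody, pvB_flat]
            | false =>
              -- no skip pattern: kept
              have hK : pvB_keep line = true := by
                show (PySem.Str.isIn "dawn"
                    (PySem.Str.lower (PySem.Str.strip (PySem.Str.slice line (some 3) none))) ||
                  !(["origin trial", "deprecation", "removal", "what's new in webgpu",
                     "chrome 1"].any (fun p => PySem.Str.isIn p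
                       (PySem.Str.lower (PySem.Str.strip (PySem.Str.slice line (some 3) none)))))) = true
                rw [hD, hA]; rfl
              simp [ih2, hK, hEmit, pvB_flat, List.append_assoc]
        constructor
        · intro acc b; exact hstep acc false b
        · intro acc
          rw [pvB_takeBody]
          simp only [if_pos hH]
          simpa using hstep acc true false
      · -- ordinary line
        have hE : pvB_emit line =
            (if PySem.Str.startswith line "### " then some ("#### " ++ PySem.Str.slice line (some 4) none)
             else if PySem.Str.startswith line "#### " then some ("##### " ++ PySem.Str.slice line (some 5) none)
             else some line) := by
          rw [pvB_emit]; simp only [if_neg hT, if_neg hH]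
        constructor
        · intro acc b
          rw [pvA_loop]
          simp only [if_neg hT, if_neg hH]
          rw [pvB_sections]
          simp only [if_neg hH]
          simpa using ih1 acc b
        · intro acc
          rw [pvA_loop]
          simp only [if_neg hT, if_neg hH]
          rw [pvB_takeBody]
          simp only [if_neg hH, List.filterMap_cons, hE]
          by_cases h3 : PySem.Str.startswith line "### " = true
          · simp only [if_pos h3]
            simp [ih2, List.append_assoc]
          · simp only [if_neg h3]
            by_cases h4 : PySem.Str.startswith line "#### " = true
            · simp only [if_pos h4]
              simp [ih2, List.append_assoc]
            · simp only [if_neg h4]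
              simp [ih2, List.append_assoc]

-- A's while-pop trim equals B's reverse/dropWhile trim
theorem pv_trim_eq (xs : List String) : pvA_trim xs = pvB_trim xs := by
  induction xs using List.reverseRecOn with
  | nil => rw [pvA_trim]; simp [pvB_trim]
  | append_singleton xs x ih =>
    rw [pvA_trim,
      if_neg (List.append_ne_nil_of_right_ne_nil _ (by simp : ([x] : List String) ≠ []))]
    by_cases hb : (PySem.Str.strip x == "") = true
    · rw [if_pos (by simpa [List.getLastD_concat] using hb)]
      rw [List.dropLast_concat, ih, pvB_trim, pvB_trim]
      simp [hb]
    · rw [if_neg (by simpa [List.getLastD_concat] using hb)]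
      rw [pvB_trim]
      simp [hb]

-- ===== VERDICT (by name: the statement is the Claim_ definition above) =====
theorem extract_webgpu_features_py_spec : Claim_equal_extract_webgpu_features_py := by
  intro s _
  show extract_webgpu_features_py s = extract_webgpu_features_py_alt s
  show PySem.Str.join "\n" (pvA_trim (pvA_loop ((PySem.Str.split? s "\n").getD []) [] false false)) =
    PySem.Str.join "\n" (pvB_trim (pvB_flat (pvB_sections ((PySem.Str.split? s "\n").getD []))))
  rw [(pv_main _).1 [] false, pv_trim_eq]
  simp
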